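-- pv_equiv track=rewrite | github.com/SophiaChen23/Artificial-Intelligence | homework2.py | num_placements_all
-- ===== SOURCE A (Python) =====
-- def num_placements_all(n):
--     if n == 0:
--         return 0
--     elif n == 1:
--         return 1
--     else:
--         temp = 0
--         for x in range(n ** 2, n ** 2 - n, -1):
--             temp += x
--         return temp
-- ===== SOURCE B (Python) =====
-- def num_placements_all(n):
--     if n <= 0:
--         return 0
--     return n**3 - n * (n - 1) // 2
-- ===== Notes on version B (the rewrite author's own statement) =====
-- stated objective: faster
-- what changed: Replaces the O(n) descending-range summation loop by the closed-form arithmetic-series formula n^3 - n(n-1)/2, with 0 for nonpositive n.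
import Mathlib
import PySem

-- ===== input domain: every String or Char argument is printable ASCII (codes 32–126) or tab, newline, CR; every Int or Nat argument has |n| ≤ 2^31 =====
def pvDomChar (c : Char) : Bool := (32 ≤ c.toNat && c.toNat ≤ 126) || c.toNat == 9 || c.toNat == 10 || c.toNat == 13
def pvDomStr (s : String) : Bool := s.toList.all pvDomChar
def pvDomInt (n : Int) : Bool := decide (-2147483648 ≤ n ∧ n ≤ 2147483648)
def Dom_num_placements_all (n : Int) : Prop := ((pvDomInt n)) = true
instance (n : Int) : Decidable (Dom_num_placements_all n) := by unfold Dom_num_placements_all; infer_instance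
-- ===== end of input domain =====

-- B replaces A's O(n) descending summation loop by the closed-form series formula (objective: faster, asymptotic).

-- ===== PORT A =====
def num_placements_all (n : Int) : Int :=
  if n == 0 then 0
  else if n == 1 then 1
  else (PySem.List.pyRange (n ^ 2) (n ^ 2 - n) (-1)).foldl (fun temp x => temp + x) 0

-- ===== PORT B =====
def num_placements_all_alt (n : Int) : Int :=
  if n ≤ 0 then 0
  else n ^ 3 - PySem.Int.floordiv (n * (n - 1)) 2

-- ===== PRECONDITION & SPEC =====
def Spec_num_placements_all (n : Int) (out : Int) : Prop := out = num_placements_all_alt n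
instance (n : Int) (out : Int) : Decidable (Spec_num_placements_all n out) := by unfold Spec_num_placements_all; infer_instance

-- ===== CLAIM (what is proved, stated in full; the proofs are below) =====
def Claim_equal_num_placements_all : Prop := ∀ (n : Int), Dom_num_placements_all n → Spec_num_placements_all n (num_placements_all n)

-- ===== LEMMAS AND PROOFS =====

-- twice the sum of the m terms a, a-1, …, a-(m-1)
theorem pv_sum_countdown (a : Int) (m : Nat) :
    2 * ((List.range m).map (fun (k : Nat) => a - (k : Int))).foldl (fun t x => t + x) 0
      = 2 * m * a - m * (m - 1) := by
  induction m with
  | zero => simp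
  | succ m ih =>
    rw [List.range_succ, List.map_append, List.foldl_append]
    simp only [List.map_cons, List.map_nil, List.foldl_cons, List.foldl_nil]
    push_cast
    push_cast at ih
    linarith

theorem pv_fdiv_two (q : Int) : PySem.Int.floordiv (2 * q) 2 = q := by
  simp [PySem.Int.floordiv]

-- ===== VERDICT (by name: the statement is the Claim_ definition above) =====
theorem num_placements_all_spec : Claim_equal_num_placements_all := by
  intro n _
  unfold Spec_num_placements_all num_placements_all num_placements_all_alt
  rcases lt_trichotomy n 0 with hneg | hz | hpos
  · rw [PySem.List.pyRange_neg_one_eq_nil (by nlinarith)]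
    have hne0 : (n == 0) = false := by simp; omega
    have hne1 : (n == 1) = false := by simp; omega
    rw [hne0, hne1]
    norm_num [List.foldl, hneg.le]
  · simp [hz]
  · have h2 : Even (n * (n - 1)) := by
      rcases Int.even_or_odd n with h | h
      · exact h.mul_right _
      · exact (Odd.sub_odd h odd_one).mul_left _
    obtain ⟨q, hq⟩ := h2
    have hq' : n * (n - 1) = 2 * q := by linarith
    rcases eq_or_lt_of_le (by omega : (1:Int) ≤ n) with h1 | h1
    · -- n = 1
      have : n = 1 := h1.symm
      subst this
      decide
    · -- n ≥ 2
      have hne0 : (n == 0) = false := by simp; omega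
      have hne1 : (n == 1) = false := by simp; omega
      have hnle : ¬ n ≤ 0 := by omega
      rw [hne0, hne1]
      simp only [Bool.false_eq_true, if_false, if_neg hnle]
      rw [PySem.List.pyRange_neg_one]
      have hlen : (n ^ 2 - (n ^ 2 - n)).toNat = n.toNat := by omega
      rw [hlen, hq', pv_fdiv_two]
      have hs := pv_sum_countdown (n ^ 2) n.toNat
      have hn : (n.toNat : Int) = n := by omega
      rw [hn] at hs
      nlinarith [hs]
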